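-- pv_equiv track=rewrite | github.com/le30r/ege | 20_27748.py | wins_on_move_2
-- ===== SOURCE A (Python) =====
-- def get_moves(m, n):
--     return [(m, n + 1), (m, n * 4), (m + 1, n), (m * 4, n)]
--
-- def can_win_now(m, n):
--     return any(nm + ns >= 82 for nm, ns in get_moves(m, n)) # можем ли мы выиграть хотя бы одним ходом сейчас
--
-- def wins_on_move_2(m, n):
--     if can_win_now(m, n): # проверяем что мы не можем выиграть с первого хода
--         return False
--
--     for pm, ps in get_moves(m, n): # для всех наших ходов
--         if pm + ps >= 82:  # проверяем что не выигрываем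
--             continue
--
--         vanya_moves = get_moves(pm, ps) # все ходы Вани
--
--         if any(vm + vs >= 82 for vm, vs in vanya_moves): # если хотя бы один из них - выигрышный, нам такой ход не подходит
--             continue
--
--         if all(can_win_now(vm, vs) for vm, vs in vanya_moves): # если все ходы Вани из этой комбинации принесут нам победу следующим ходом, нам это подходит
--             return True
--
--     return False
-- ===== SOURCE B (Python) =====
-- def get_moves(m, n):
--     return [(m, n + 1), (m, n * 4), (m + 1, n), (m * 4, n)]
--
-- def can_force_win(m, n, depth):
--     # True iff the player to move can guarantee reaching a sum >= 82
--     # within `depth` of their own moves, the opponent never winning first.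
--     if depth == 0:
--         return False
--     moves = get_moves(m, n)
--     if any(a + b >= 82 for a, b in moves):
--         return True
--     if depth == 1:
--         return False
--     return any(
--         not any(x + y >= 82 for x, y in get_moves(a, b))
--         and all(can_force_win(x, y, depth - 1) for x, y in get_moves(a, b))
--         for a, b in moves)
--
-- def wins_on_move_2(m, n):
--     return not can_force_win(m, n, 1) and can_force_win(m, n, 2)
-- ===== Notes on version B (the rewrite author's own statement) =====
-- stated objective: alternative
-- what changed: Replaces A's hand-unrolled two-ply double loop by a recursive minimax helper can_force_win(m,n,depth) (win within depth own moves, opponent never winning first); wins_on_move_2 = not can_force_win(.,1) and can_force_win(.,2).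
import Mathlib
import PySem

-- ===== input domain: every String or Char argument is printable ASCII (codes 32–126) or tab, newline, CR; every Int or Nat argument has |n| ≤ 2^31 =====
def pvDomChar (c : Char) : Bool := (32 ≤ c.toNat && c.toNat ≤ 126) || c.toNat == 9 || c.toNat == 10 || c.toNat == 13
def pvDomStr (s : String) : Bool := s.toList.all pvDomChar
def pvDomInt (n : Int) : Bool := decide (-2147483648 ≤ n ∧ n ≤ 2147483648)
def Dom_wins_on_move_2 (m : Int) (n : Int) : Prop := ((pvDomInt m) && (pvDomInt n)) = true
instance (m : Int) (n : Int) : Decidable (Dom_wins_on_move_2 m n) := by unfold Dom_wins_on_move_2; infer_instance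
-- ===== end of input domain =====

-- ===== PORT A =====
-- B explores the same game tree through a recursive depth-bounded minimax helper instead of
-- A's hand-unrolled two-level loop; same return value everywhere (objective: alternative).
def get_moves (m : Int) (n : Int) : List (Int × Int) :=
  [(m, n + 1), (m, n * 4), (m + 1, n), (m * 4, n)]

def can_win_now (m : Int) (n : Int) : Bool :=
  (get_moves m n).any (fun p => decide (p.1 + p.2 ≥ 82))

def wins_on_move_2 (m : Int) (n : Int) : Bool :=
  if can_win_now m n then false
  else
    (get_moves m n).any (fun p =>
      if p.1 + p.2 ≥ 82 then false
      else
        let vanya_moves := get_moves p.1 p.2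
        if vanya_moves.any (fun v => decide (v.1 + v.2 ≥ 82)) then false
        else vanya_moves.all (fun v => can_win_now v.1 v.2))

-- ===== PORT B =====
def can_force_win (m : Int) (n : Int) : Nat → Bool
  | 0 => false
  | depth + 1 =>
    let moves := get_moves m n
    if moves.any (fun p => decide (p.1 + p.2 ≥ 82)) then true
    else if depth = 0 then false
    else moves.any (fun p =>
      !((get_moves p.1 p.2).any (fun v => decide (v.1 + v.2 ≥ 82))) &&
      (get_moves p.1 p.2).all (fun v => can_force_win v.1 v.2 depth))

def wins_on_move_2_alt (m : Int) (n : Int) : Bool :=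
  !can_force_win m n 1 && can_force_win m n 2

-- ===== PRECONDITION & SPEC =====
def Spec_wins_on_move_2 (m : Int) (n : Int) (out : Bool) : Prop := out = wins_on_move_2_alt m n
instance (m : Int) (n : Int) (out : Bool) : Decidable (Spec_wins_on_move_2 m n out) := by unfold Spec_wins_on_move_2; infer_instance

-- ===== CLAIM (what is proved, stated in full; the proofs are below) =====
def Claim_equal_wins_on_move_2 : Prop := ∀ (m : Int) (n : Int), Dom_wins_on_move_2 m n → Spec_wins_on_move_2 m n (wins_on_move_2 m n)

-- ===== LEMMAS AND PROOFS =====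
theorem can_force_win_one (a b : Int) : can_force_win a b 1 = can_win_now a b := by
  simp [can_force_win, can_win_now]

-- ===== VERDICT (by name: the statement is the Claim_ definition above) =====
theorem wins_on_move_2_spec : Claim_equal_wins_on_move_2 := by
  intro m n _
  unfold Spec_wins_on_move_2
  unfold wins_on_move_2_alt
  rw [can_force_win_one]
  cases h : can_win_now m n with
  | true =>
    simp [wins_on_move_2, h]
  | false =>
    have h' := h
    simp [can_win_now, get_moves, List.any] at h'
    obtain ⟨h1, h2, h3, h4⟩ := h'
    have g1 : decide (82 ≤ m + (n + 1)) = false := by simp; omega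
    have g2 : decide (82 ≤ m + n * 4) = false := by simp; omega
    have g3 : decide (82 ≤ m + 1 + n) = false := by simp; omega
    have g4 : decide (82 ≤ m * 4 + n) = false := by simp; omega
    simp [wins_on_move_2, can_force_win, can_win_now, get_moves,
      g1, g2, g3, g4]
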